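-- pv_equiv track=rewrite | github.com/AlexaZarytova/Yandex_Lyceum_1 | pythonProject4/help.py | f
-- ===== SOURCE A (Python) =====
-- def f(a):
--     if a == 0:
--         return 1
--     elif a == 1:
--         return 3
--     elif a > 1 and a % 2 == 0:
--         return f(a - 1) - f(a - 2) + 3 * a
--     elif a > 1 and a % 2 != 0:
--         return f(a - 2) - f(a - 3) + 2 * a
-- ===== SOURCE B (Python) =====
-- def f(a):
--     if a == 0:
--         return 1
--     # (x, y, z) = (f(k-2), f(k-1), f(k)); x's initial value is never read
--     x, y, z = 0, 1, 3
--     for k in range(2, a + 1):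
--         if k % 2 == 0:
--             x, y, z = y, z, z - y + 3 * k
--         else:
--             x, y, z = y, z, y - x + 2 * k
--     return z
-- ===== Notes on version B (the rewrite author's own statement) =====
-- stated objective: faster
-- what changed: Replaced the exponential tree recursion by a single bottom-up loop carrying the last three values (f(k-2), f(k-1), f(k)).
-- outside the precondition, e.g. on f(-1): A returns None, B returns 3; on f(1000000): A raises RecursionError, B returns 2000004
import Mathlib
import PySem

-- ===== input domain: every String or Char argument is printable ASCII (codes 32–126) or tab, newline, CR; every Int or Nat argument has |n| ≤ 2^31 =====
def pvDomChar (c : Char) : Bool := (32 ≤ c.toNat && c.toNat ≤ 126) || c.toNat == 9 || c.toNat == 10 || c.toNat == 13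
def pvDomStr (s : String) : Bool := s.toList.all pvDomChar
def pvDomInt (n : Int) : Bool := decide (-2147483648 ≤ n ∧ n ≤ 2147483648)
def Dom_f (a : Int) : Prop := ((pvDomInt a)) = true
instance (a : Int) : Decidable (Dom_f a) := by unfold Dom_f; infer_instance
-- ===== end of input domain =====

-- B replaces A's exponential double recursion by one bottom-up pass keeping the last three values (faster, asymptotic).

-- ===== PORT A =====
-- literal transliteration of A's branch structure; the final 'else' (a < 0, where Python
-- returns None) is outside Pre_f and returns a dummy 0
def f (a : Int) : Int :=
  if a == 0 then 1
  else if a == 1 then 3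
  else if a > 1 && PySem.Int.mod a 2 == 0 then f (a - 1) - f (a - 2) + 3 * a
  else if a > 1 && PySem.Int.mod a 2 != 0 then f (a - 2) - f (a - 3) + 2 * a
  else 0
termination_by a.toNat
decreasing_by all_goals simp_all [PySem.Int.mod]; omega

-- ===== PORT B =====
def f_alt (a : Int) : Int :=
  if a == 0 then 1
  else
    let t := (PySem.List.pyRange 2 (a + 1) 1).foldl
      (fun (s : Int × Int × Int) k =>
        if PySem.Int.mod k 2 == 0 then (s.2.1, s.2.2, s.2.2 - s.2.1 + 3 * k)
        else (s.2.1, s.2.2, s.2.1 - s.1 + 2 * k))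
      (0, 1, 3)
    t.2.2

-- ===== PRECONDITION & SPEC =====
-- Pre_f excludes negative a, on which Python A falls through every branch and returns
-- None (not an int), and a ≥ 1995, on which A's leftmost recursion chain (depth about
-- a/2) exceeds CPython's default recursion limit of 1000 and A raises RecursionError.
def Pre_f (a : Int) : Prop := 0 ≤ a ∧ a < 1995
instance (a : Int) : Decidable (Pre_f a) := by unfold Pre_f; infer_instance
def pvWitness_f : Int := 5
def Spec_f (a : Int) (out : Int) : Prop := out = f_alt a
instance (a : Int) (out : Int) : Decidable (Spec_f a out) := by unfold Spec_f; infer_instance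

-- ===== CLAIM (what is proved, stated in full; the proofs are below) =====
def Claim_equal_f : Prop := ∀ (a : Int), Dom_f a → Pre_f a → Spec_f a (f a)

-- ===== LEMMAS AND PROOFS =====

-- the loop step of f_alt
def fStep (s : Int × Int × Int) (k : Int) : Int × Int × Int :=
  if PySem.Int.mod k 2 == 0 then (s.2.1, s.2.2, s.2.2 - s.2.1 + 3 * k)
  else (s.2.1, s.2.2, s.2.1 - s.1 + 2 * k)

-- value carried in the first slot at stage n+1 (unread at n = 0)
def fPrev : Nat → Int
  | 0 => 0
  | k + 1 => f k

theorem pymod2 (x : Int) : PySem.Int.mod x 2 = x % 2 :=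
  PySem.Int.mod_eq_emod_of_pos (by norm_num)

theorem f_zero : f 0 = 1 := by simp [f]
theorem f_one : f 1 = 3 := by simp [f]

theorem fPrev_eq (m : Nat) (hm : 1 ≤ m) : fPrev m = f ((m : Int) - 1) := by
  cases m with
  | zero => omega
  | succ k => simp only [fPrev]; congr 1; push_cast; ring

theorem f_even_step (m : Nat) (hmod : ((m : Int) + 2) % 2 = 0) :
    f ((m : Int) + 2) = f ((m : Int) + 1) - f (m : Int) + 3 * ((m : Int) + 2) := by
  rw [f]
  have h0 : (((m : Int) + 2) == 0) = false := by simp; omega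
  have h1 : (((m : Int) + 2) == 1) = false := by simp; omega
  have h2 : (decide ((m : Int) + 2 > 1) && ((PySem.Int.mod ((m : Int) + 2) 2) == 0)) = true := by
    simp [hmod]; omega
  simp only [h0, h1, h2, Bool.false_eq_true, if_false, if_true]
  ring_nf

theorem f_odd_step (m : Nat) (hmod : ((m : Int) + 2) % 2 = 1) :
    f ((m : Int) + 2) = f (m : Int) - f ((m : Int) - 1) + 2 * ((m : Int) + 2) := by
  rw [f]
  have h0 : (((m : Int) + 2) == 0) = false := by simp; omega
  have h1 : (((m : Int) + 2) == 1) = false := by simp; omega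
  have h2 : (decide ((m : Int) + 2 > 1) && ((PySem.Int.mod ((m : Int) + 2) 2) == 0)) = false := by
    simp; intro _; omega
  have h3 : (decide ((m : Int) + 2 > 1) && ((PySem.Int.mod ((m : Int) + 2) 2) != 0)) = true := by
    simp; exact ⟨by omega, by omega⟩
  simp only [h0, h1, h2, h3, Bool.false_eq_true, if_false, if_true]
  ring_nf

theorem loop_invariant (n : Nat) :
    (PySem.List.pyRange 2 ((n : Int) + 1 + 1) 1).foldl fStep (0, 1, 3)
      = (fPrev n, f (n : Int), f ((n : Int) + 1)) := by
  induction n with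
  | zero =>
      rw [show PySem.List.pyRange 2 ((0 : Nat) + 1 + 1 : Int) 1 = [] from
        PySem.List.pyRange_one_eq_nil (by norm_num)]
      simp [fPrev, f_zero, f_one]
  | succ m ih =>
      have h : PySem.List.pyRange 2 (((m + 1 : Nat) : Int) + 1 + 1) 1
          = PySem.List.pyRange 2 ((m : Int) + 1 + 1) 1 ++ [(m : Int) + 2] := by
        have := PySem.List.pyRange_one_succ_right (a := 2) (b := (m : Int) + 2) (by omega)
        push_cast
        convert this using 2
      rw [h, List.foldl_append, ih]
      simp only [List.foldl_cons, List.foldl_nil, fStep, pymod2]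
      by_cases hmod : ((m : Int) + 2) % 2 = 0
      · rw [if_pos (by simp [hmod])]
        have h3 := f_even_step m hmod
        have hp : fPrev (m + 1) = f (m : Int) := rfl
        push_cast
        rw [hp, show (m : Int) + 1 + 1 = (m : Int) + 2 by ring, h3]
      · have hmod1 : ((m : Int) + 2) % 2 = 1 := by omega
        have hm1 : 1 ≤ m := by omega
        rw [if_neg (by simp [hmod1])]
        have h3 := f_odd_step m hmod1
        have hp : fPrev (m + 1) = f (m : Int) := rfl
        push_cast
        rw [hp, show (m : Int) + 1 + 1 = (m : Int) + 2 by ring, h3, fPrev_eq m hm1]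

theorem f_spec : Claim_equal_f := by
  unfold Claim_equal_f Spec_f Pre_f
  intro a _ ha
  obtain ⟨ha, -⟩ := ha
  by_cases h0 : a = 0
  · subst h0; simp [f_alt, f_zero]
  · have h1 : 1 ≤ a := by omega
    obtain ⟨n, rfl⟩ : ∃ n : Nat, a = (n : Int) + 1 :=
      ⟨(a - 1).toNat, by omega⟩
    simp only [f_alt, if_neg (by simp; omega : ¬ (((n : Int) + 1) == 0) = true)]
    rw [show (fun (s : Int × Int × Int) (k : Int) =>
        if PySem.Int.mod k 2 == 0 then (s.2.1, s.2.2, s.2.2 - s.2.1 + 3 * k)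
        else (s.2.1, s.2.2, s.2.1 - s.1 + 2 * k)) = fStep from rfl, loop_invariant n]
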